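-- pv_equiv track=rewrite | github.com/bfranke1973/Heureka | augmentum-main/driver/augmentum/priors.py | find_initial_bounds
-- ===== SOURCE A (Python) =====
-- from numbers import Number
-- from typing import Any, Dict, Iterable, Optional, Set, Tuple
--
-- def find_initial_bounds(
--     tests: Dict[Number, bool], initial_min_bound: Number, initial_max_bound: Number
-- ) -> Optional[Tuple[Number, Number, Number, Number]]:
--     """
--     Determine the longest contiguous interval in the given initial values
--     and return initial lower and upper bound at the left and right of that
--     interval.
--
--     Interval can be a single value in which case upper and lower are the same.
--
--     Interval size is measured at a change from failing to succeeding tests until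
--     change from succeeding to failing test.
--
--     Min_bound and max_bound are either their original value if lower and upper
--     are at the borders of the initial values or the closest failing value
--     next to its corresponding bound.
--
--     Returns Lower, Upper, Min_Bound, Max_Bound or none if no matching bounds
--     can be found.
--     """
--     n = len(tests)
--     li = 0  # lower idx
--     ui = 0  # upper idx
--
--     max_lower_idx = None
--     max_upper_idx = None
--     max_diff = None
--
--     keys = sorted(tests.keys())
--
--     # edge case for single true entry
--     if n == 1 and tests[keys[0]] is True:
--         return keys[0], keys[0], initial_min_bound, initial_max_bound
--
--     while ui < n and li < n - 1:
--         # look for change from False to True for lower (or if at True zero index)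
--         if not (
--             (tests[keys[li]] is True and li == 0)
--             or (tests[keys[li]] is False and tests[keys[li + 1]] is True)
--         ):
--             li += 1
--             ui = li
--         # look for change from True to False for upper (or if at True last index)
--         elif not (
--             (tests[keys[ui]] is True and ui == n - 1)
--             or (tests[keys[ui]] is True and tests[keys[ui + 1]] is False)
--         ):
--             ui += 1
--         else:
--             u_bound = keys[ui + 1] if ui < n - 1 else keys[ui]
--             l_bound = keys[li]
--             curr_diff = abs(u_bound - l_bound)
--             if max_diff is None or max_diff < curr_diff:
--                 max_diff = curr_diff
--                 # remember valid values
--                 max_lower_idx = (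
--                     li if li == 0 and tests[keys[li]] is True else li + 1
--                 )
--                 max_upper_idx = ui
--
--             ui += 1
--             li = ui
--
--     if max_diff is None:
--         return None, None, None, None
--
--     lower = keys[max_lower_idx]
--     upper = keys[max_upper_idx]
--     min_bound = initial_min_bound
--     max_bound = initial_max_bound
--
--     # set min and max bound to closest failing value in history
--     # if one exists beyond the starting bounds
--     if max_lower_idx > 0:
--         min_bound = keys[max_lower_idx - 1]
--
--     if max_upper_idx < n - 1:
--         max_bound = keys[max_upper_idx + 1]
--
--     return lower, upper, min_bound, max_bound
-- ===== SOURCE B (Python) =====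
-- from numbers import Number
-- from typing import Dict, Optional, Tuple
--
--
-- def find_initial_bounds(
--     tests: Dict[Number, bool], initial_min_bound: Number, initial_max_bound: Number
-- ) -> Optional[Tuple[Number, Number, Number, Number]]:
--     """Collect every maximal contiguous run of True values over the sorted
--     keys, then pick the run with the strictly largest bound span (first wins
--     ties) and report it with its neighbouring failing keys as bounds."""
--     keys = sorted(tests)
--     n = len(keys)
--
--     # one forward scan: every maximal run of True values as (start, end) index pairs
--     runs = []
--     start = None
--     for i in range(n):
--         if tests[keys[i]] is True:
--             if start is None:
--                 start = i
--         else: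
--             if start is not None:
--                 runs.append((start, i - 1))
--                 start = None
--     if start is not None:
--         runs.append((start, n - 1))
--
--     # pick the run with the largest span between its surrounding keys
--     best = None  # (span, start, end)
--     for s, e in runs:
--         lo = keys[s - 1] if s > 0 else keys[0]
--         hi = keys[e + 1] if e < n - 1 else keys[e]
--         span = abs(hi - lo)
--         if best is None or span > best[0]:
--             best = (span, s, e)
--
--     if best is None:
--         return None, None, None, None
--     _, s, e = best
--     return (
--         keys[s],
--         keys[e],
--         keys[s - 1] if s > 0 else initial_min_bound,
--         keys[e + 1] if e < n - 1 else initial_max_bound,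
--     )
-- ===== Notes on version B (the rewrite author's own statement) =====
-- stated objective: simpler
-- what changed: Replaces A's two-pointer while-loop state machine (li/ui pointers that reset each other, a special-cased n==1 early return) with two plain passes: one forward scan that collects every maximal True-run as (start,end) index pairs, then a fold picking the run with the strictly largest span; the n==1 case falls out of the general code.
import Mathlib
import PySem

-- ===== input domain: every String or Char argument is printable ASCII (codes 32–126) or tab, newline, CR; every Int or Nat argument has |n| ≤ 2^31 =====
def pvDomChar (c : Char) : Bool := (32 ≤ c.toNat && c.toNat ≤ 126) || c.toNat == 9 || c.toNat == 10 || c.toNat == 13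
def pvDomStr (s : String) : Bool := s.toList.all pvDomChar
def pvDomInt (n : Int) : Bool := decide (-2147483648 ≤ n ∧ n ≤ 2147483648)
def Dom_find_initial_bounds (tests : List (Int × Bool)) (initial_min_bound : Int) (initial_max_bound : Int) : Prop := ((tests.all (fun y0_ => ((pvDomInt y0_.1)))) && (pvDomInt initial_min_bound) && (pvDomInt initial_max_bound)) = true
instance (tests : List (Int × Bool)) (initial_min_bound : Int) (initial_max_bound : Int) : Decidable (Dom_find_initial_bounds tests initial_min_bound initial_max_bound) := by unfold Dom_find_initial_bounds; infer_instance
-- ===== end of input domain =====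

-- B replaces A's two-pointer while-loop state machine with two plain passes
-- (collect all maximal True-runs, then pick the widest-span run); objective: simpler.

-- ===== PORT A =====
-- A's while loop; state (li, ui) with the Python accumulator
-- (max_lower_idx, max_upper_idx, max_diff); the hypothesis li ≤ ui (an
-- invariant of the Python loop) is carried only for termination.
def pvA_loop (keys : List Int) (g : Int → Bool) (n li ui : Nat)
    (st : Option Nat × Option Nat × Option Int) (hlu : li ≤ ui) :
    Option Nat × Option Nat × Option Int :=
  if _h : ui < n ∧ li < n - 1 then
    if ¬((g (keys.getD li 0) = true ∧ li = 0) ∨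
         (g (keys.getD li 0) = false ∧ g (keys.getD (li+1) 0) = true)) then
      pvA_loop keys g n (li+1) (li+1) st le_rfl
    else if ¬((g (keys.getD ui 0) = true ∧ ui = n - 1) ∨
              (g (keys.getD ui 0) = true ∧ g (keys.getD (ui+1) 0) = false)) then
      pvA_loop keys g n li (ui+1) st (Nat.le_succ_of_le hlu)
    else
      let u_bound := if ui < n - 1 then keys.getD (ui+1) 0 else keys.getD ui 0
      let l_bound := keys.getD li 0
      let curr := |u_bound - l_bound|
      let st' :=
        match st with
        | (mli, mui, md) =>
          match md with
          | none => (some (if li = 0 ∧ g (keys.getD li 0) = true then li else li + 1), some ui, some curr)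
          | some m =>
            if m < curr then
              (some (if li = 0 ∧ g (keys.getD li 0) = true then li else li + 1), some ui, some curr)
            else (mli, mui, md)
      pvA_loop keys g n (ui+1) (ui+1) st' le_rfl
  else st
termination_by (n - li, n - ui)
decreasing_by
  · exact Prod.Lex.left _ _ (by omega)
  · exact Prod.Lex.right _ (by omega)
  · exact Prod.Lex.left _ _ (by omega)

def find_initial_bounds (tests : List (Int × Bool)) (initial_min_bound : Int) (initial_max_bound : Int) : Option Int × Option Int × Option Int × Option Int :=
  let d := PySem.Dict.ofList tests
  let keys := PySem.List.sorted d.keys (fun x => x) false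
  let g : Int → Bool := fun k => d.getD k false
  let n := keys.length
  if n = 1 ∧ g (keys.getD 0 0) = true then
    (some (keys.getD 0 0), some (keys.getD 0 0), some initial_min_bound, some initial_max_bound)
  else
    match pvA_loop keys g n 0 0 (none, none, none) le_rfl with
    | (_, _, none) => (none, none, none, none)
    | (mli, mui, some _) =>
      let l := mli.getD 0
      let u := mui.getD 0
      (some (keys.getD l 0), some (keys.getD u 0),
       some (if 0 < l then keys.getD (l-1) 0 else initial_min_bound),
       some (if u < n - 1 then keys.getD (u+1) 0 else initial_max_bound))

-- ===== PORT B =====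
-- first pass of Source B: the body of 'for i in range(n)', state (runs, start)
def pvB_scanStep (g : Int → Bool) (keys : List Int)
    (st : List (Nat × Nat) × Option Nat) (i : Nat) : List (Nat × Nat) × Option Nat :=
  if g (keys.getD i 0) = true then
    match st.2 with
    | none => (st.1, some i)
    | some _ => st
  else
    match st.2 with
    | none => st
    | some s => (st.1 ++ [(s, i - 1)], none)

-- second pass of Source B: the body of 'for s, e in runs', state best = (span, s, e)
def pvB_bestStep (keys : List Int) (n : Nat)
    (best : Option (Int × Nat × Nat)) (r : Nat × Nat) : Option (Int × Nat × Nat) :=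
  let lo := if 0 < r.1 then keys.getD (r.1 - 1) 0 else keys.getD 0 0
  let hi := if r.2 < n - 1 then keys.getD (r.2 + 1) 0 else keys.getD r.2 0
  let span := |hi - lo|
  match best with
  | none => some (span, r.1, r.2)
  | some b => if b.1 < span then some (span, r.1, r.2) else best

def find_initial_bounds_alt (tests : List (Int × Bool)) (initial_min_bound : Int) (initial_max_bound : Int) : Option Int × Option Int × Option Int × Option Int :=
  let d := PySem.Dict.ofList tests
  let keys := PySem.List.sorted d.keys (fun x => x) false
  let g : Int → Bool := fun k => d.getD k false
  let n := keys.length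
  let p := (List.range n).foldl (pvB_scanStep g keys) ([], none)
  let runs := match p.2 with
    | none => p.1
    | some s => p.1 ++ [(s, n - 1)]
  match runs.foldl (pvB_bestStep keys n) none with
  | none => (none, none, none, none)
  | some (_, s, e) =>
    (some (keys.getD s 0), some (keys.getD e 0),
     some (if 0 < s then keys.getD (s-1) 0 else initial_min_bound),
     some (if e < n - 1 then keys.getD (e+1) 0 else initial_max_bound))

-- ===== PRECONDITION & SPEC =====
def Spec_find_initial_bounds (tests : List (Int × Bool)) (initial_min_bound : Int) (initial_max_bound : Int) (out : Option Int × Option Int × Option Int × Option Int) : Prop := out = find_initial_bounds_alt tests initial_min_bound initial_max_bound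
instance (tests : List (Int × Bool)) (initial_min_bound : Int) (initial_max_bound : Int) (out : Option Int × Option Int × Option Int × Option Int) : Decidable (Spec_find_initial_bounds tests initial_min_bound initial_max_bound out) := by unfold Spec_find_initial_bounds; infer_instance

-- ===== CLAIM (what is proved, stated in full; the proofs are below) =====
def Claim_equal_find_initial_bounds : Prop := ∀ (tests : List (Int × Bool)) (initial_min_bound : Int) (initial_max_bound : Int), Dom_find_initial_bounds tests initial_min_bound initial_max_bound → Spec_find_initial_bounds tests initial_min_bound initial_max_bound (find_initial_bounds tests initial_min_bound initial_max_bound)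

-- ===== LEMMAS AND PROOFS =====

-- proof-side spec functions: pvRunEnd (last index of the True-run starting at i),
-- pvScan (recursive form of B's first pass), pvToTriple (B's best as A's accumulator)
def pvRunEnd (b : Nat → Bool) (n i : Nat) : Nat :=
  if h : i + 1 < n then (if b (i+1) then pvRunEnd b n (i+1) else i) else i
termination_by n - i

theorem pvRunEnd_ge (b : Nat → Bool) (n i : Nat) : i ≤ pvRunEnd b n i := by
  induction i using pvRunEnd.induct (b := b) (n := n) with
  | case1 i h hb ih => rw [pvRunEnd]; simp [h, hb]; omega
  | case2 i h hb => rw [pvRunEnd]; simp [h, hb]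
  | case3 i h => rw [pvRunEnd]; simp [h]

theorem pvRunEnd_lt (b : Nat → Bool) (n i : Nat) (h : i < n) : pvRunEnd b n i < n := by
  induction i using pvRunEnd.induct (b := b) (n := n) with
  | case1 i h1 hb ih => rw [pvRunEnd]; simp [h1, hb]; exact ih h1
  | case2 i h1 hb => rw [pvRunEnd]; simp [h1, hb]; omega
  | case3 i h1 => rw [pvRunEnd]; simp [h1]; omega

theorem pvRunEnd_true (b : Nat → Bool) (n i : Nat) :
    ∀ j, i < j → j ≤ pvRunEnd b n i → b j = true := by
  induction i using pvRunEnd.induct (b := b) (n := n) with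
  | case1 i h hb ih =>
    intro j hj1 hj2
    rw [pvRunEnd] at hj2; simp [h, hb] at hj2
    rcases Nat.lt_or_ge (i+1) j with hc | hc
    · exact ih j hc hj2
    · have : j = i + 1 := by omega
      subst this; exact hb
  | case2 i h hb => intro j hj1 hj2; rw [pvRunEnd] at hj2; simp [h, hb] at hj2; omega
  | case3 i h => intro j hj1 hj2; rw [pvRunEnd] at hj2; simp [h] at hj2; omega

theorem pvRunEnd_stop (b : Nat → Bool) (n i : Nat) (h : pvRunEnd b n i + 1 < n) :
    b (pvRunEnd b n i + 1) = false := by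
  induction i using pvRunEnd.induct (b := b) (n := n) with
  | case1 i h1 hb ih => rw [pvRunEnd] at h ⊢; simp [h1, hb] at h ⊢; exact ih h
  | case2 i h1 hb => rw [pvRunEnd] at h ⊢; simp [h1, hb] at h ⊢
  | case3 i h1 => rw [pvRunEnd] at h ⊢; simp [h1] at h ⊢

def pvScan (b : Nat → Bool) (n i : Nat) (start : Option Nat) (acc : List (Nat × Nat)) : List (Nat × Nat) :=
  if _h : i < n then
    if b i then
      match start with
      | none => pvScan b n (i+1) (some i) acc
      | some _ => pvScan b n (i+1) start acc
    else
      match start with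
      | none => pvScan b n (i+1) none acc
      | some s => pvScan b n (i+1) none (acc ++ [(s, i - 1)])
  else
    match start with
    | none => acc
    | some s => acc ++ [(s, n - 1)]
termination_by n - i

def pvToTriple : Option (Int × Nat × Nat) → Option Nat × Option Nat × Option Int
  | none => (none, none, none)
  | some (m, s, e) => (some s, some e, some m)

theorem pvScan_append (b : Nat → Bool) (n : Nat) :
    ∀ k i, n - i = k → ∀ start acc, pvScan b n i start acc = acc ++ pvScan b n i start [] := by
  intro k
  induction k with
  | zero =>
    intro i hk start acc
    have hi : ¬ i < n := by omega
    conv_lhs => rw [pvScan.eq_def]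
    conv_rhs => rw [pvScan.eq_def]
    rw [dif_neg hi, dif_neg hi]
    cases start <;> simp
  | succ k ih =>
    intro i hk start acc
    have hi : i < n := by omega
    have ih1 := fun st a => ih (i+1) (by omega) st a
    conv_lhs => rw [pvScan.eq_def]
    conv_rhs => rw [pvScan.eq_def]
    rw [dif_pos hi, dif_pos hi]
    by_cases hb : b i
    · rw [if_pos hb, if_pos hb]
      cases start with
      | none => exact ih1 (some i) acc
      | some s => exact ih1 (some s) acc
    · rw [if_neg hb, if_neg hb]
      cases start with
      | none => exact ih1 none acc
      | some s =>
        show pvScan b n (i+1) none (acc ++ [(s, i - 1)]) =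
          acc ++ pvScan b n (i+1) none ([] ++ [(s, i - 1)])
        rw [ih1 none (acc ++ [(s, i - 1)]), ih1 none ([] ++ [(s, i - 1)])]
        simp

theorem pvFold_scan (g : Int → Bool) (keys : List Int) (n : Nat) :
    ∀ k i, n - i = k → i ≤ n → ∀ st acc,
      (match ((List.range' i k).foldl (pvB_scanStep g keys) (acc, st)).2 with
        | none => ((List.range' i k).foldl (pvB_scanStep g keys) (acc, st)).1
        | some s => ((List.range' i k).foldl (pvB_scanStep g keys) (acc, st)).1 ++ [(s, n - 1)])
      = pvScan (fun j => g (keys.getD j 0)) n i st acc := by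
  intro k
  induction k with
  | zero =>
    intro i hk hin st acc
    have hi : ¬ i < n := by omega
    conv_rhs => rw [pvScan.eq_def]
    rw [dif_neg hi]
    cases st <;> simp
  | succ k ih =>
    intro i hk hin st acc
    have hi : i < n := by omega
    conv_rhs => rw [pvScan.eq_def]
    rw [dif_pos hi]
    rw [List.range'_succ, List.foldl_cons]
    simp only [List.getD_eq_getElem?_getD]
    by_cases hb : g (keys[i]?.getD 0) = true
    · simp only [hb, if_pos]
      cases st with
      | none =>
        have := ih (i+1) (by omega) (by omega) (some i) acc
        simpa [pvB_scanStep, hb] using this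
      | some s =>
        have := ih (i+1) (by omega) (by omega) (some s) acc
        simpa [pvB_scanStep, hb] using this
    · simp only [hb, if_neg, Bool.false_eq_true, not_false_iff]
      cases st with
      | none =>
        have := ih (i+1) (by omega) (by omega) none acc
        simpa [pvB_scanStep, hb] using this
      | some s =>
        have := ih (i+1) (by omega) (by omega) none (acc ++ [(s, i - 1)])
        simpa [pvB_scanStep, hb] using this

theorem pvScan_run (b : Nat → Bool) (n rs : Nat) (hrs : rs < n) :
    ∀ k i acc, (pvRunEnd b n rs + 1) - i = k → rs < i → i ≤ pvRunEnd b n rs + 1 →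
      pvScan b n i (some rs) acc = pvScan b n (pvRunEnd b n rs + 1) none (acc ++ [(rs, pvRunEnd b n rs)]) := by
  intro k
  induction k with
  | zero =>
    intro i acc hk h1 h2
    have hie : i = pvRunEnd b n rs + 1 := by omega
    subst hie
    have hlt := pvRunEnd_lt b n rs hrs
    by_cases hn : pvRunEnd b n rs + 1 < n
    · have hb2 : b (pvRunEnd b n rs + 1) = false := pvRunEnd_stop b n rs hn
      conv_lhs => rw [pvScan.eq_def]
      conv_rhs => rw [pvScan.eq_def]
      rw [dif_pos hn, dif_pos hn, if_neg (by simp [hb2]), if_neg (by simp [hb2])]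
      simp
    · conv_lhs => rw [pvScan.eq_def]
      conv_rhs => rw [pvScan.eq_def]
      rw [dif_neg hn, dif_neg hn]
      have : n - 1 = pvRunEnd b n rs := by omega
      simp [this]
  | succ k ih =>
    intro i acc hk h1 h2
    have hi : i ≤ pvRunEnd b n rs := by omega
    have hbi : b i = true := pvRunEnd_true b n rs i h1 hi
    have hin : i < n := by have := pvRunEnd_lt b n rs hrs; omega
    conv_lhs => rw [pvScan.eq_def]
    rw [dif_pos hin, if_pos hbi]
    exact ih (i+1) acc (by omega) (by omega) (by omega)

theorem pvLoop_run (keys : List Int) (g : Int → Bool) (n s : Nat) (hs : s < n - 1)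
    (hC : (g (keys.getD s 0) = true ∧ s = 0) ∨
          (g (keys.getD s 0) = false ∧ g (keys.getD (s+1) 0) = true)) :
    ∀ k ui (h2 : ui ≤ pvRunEnd (fun j => g (keys.getD j 0)) n (if g (keys.getD s 0) = true then s else s + 1))
      (hk : pvRunEnd (fun j => g (keys.getD j 0)) n (if g (keys.getD s 0) = true then s else s + 1) - ui = k)
      (hle : s ≤ ui) (best : Option (Int × Nat × Nat)),
      pvA_loop keys g n s ui (pvToTriple best) hle =
      pvA_loop keys g n (pvRunEnd (fun j => g (keys.getD j 0)) n (if g (keys.getD s 0) = true then s else s + 1) + 1)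
        (pvRunEnd (fun j => g (keys.getD j 0)) n (if g (keys.getD s 0) = true then s else s + 1) + 1)
        (pvToTriple (pvB_bestStep keys n best
          ((if g (keys.getD s 0) = true then s else s + 1),
            pvRunEnd (fun j => g (keys.getD j 0)) n (if g (keys.getD s 0) = true then s else s + 1)))) le_rfl := by
  set b : Nat → Bool := fun j => g (keys.getD j 0) with hbdef
  set rs : Nat := if g (keys.getD s 0) = true then s else s + 1 with hrsdef
  have hrs_n : rs < n := by rw [hrsdef]; split <;> omega
  have hrs_ub : rs ≤ s + 1 := by rw [hrsdef]; split <;> omega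
  have hsrs : s ≤ rs := by rw [hrsdef]; split <;> omega
  set re : Nat := pvRunEnd b n rs with hredef
  have hre_lt : re < n := pvRunEnd_lt b n rs hrs_n
  have hrs_le : rs ≤ re := pvRunEnd_ge b n rs
  have hbrs : b rs = true := by
    rcases hC with ⟨h1, h2⟩ | ⟨h1, h2⟩
    · have : rs = s := by rw [hrsdef, if_pos h1]
      rw [this]; simpa [hbdef] using h1
    · have : rs = s + 1 := by rw [hrsdef, if_neg (by rw [h1]; simp)]
      rw [this]; simpa [hbdef] using h2
  have hX : (if s = 0 ∧ g (keys.getD s 0) = true then s else s + 1) = rs := by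
    rcases hC with ⟨h1, h0⟩ | ⟨h1, h0⟩
    · rw [if_pos ⟨h0, h1⟩, hrsdef, if_pos h1]
    · rw [if_neg (by rw [h1]; simp), hrsdef, if_neg (by rw [h1]; simp)]
  have hlo : (if 0 < rs then keys.getD (rs - 1) 0 else keys.getD 0 0) = keys.getD s 0 := by
    rcases hC with ⟨h1, h0⟩ | ⟨h1, h0⟩
    · have hz : rs = 0 := by rw [hrsdef, if_pos h1, h0]
      rw [hz, h0]; simp
    · have hz : rs = s + 1 := by rw [hrsdef, if_neg (by rw [h1]; simp)]
      rw [hz]; simp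
  intro k
  induction k with
  | zero =>
    intro ui h2 hk hle best
    have huie : ui = re := by omega
    subst huie
    conv_lhs => rw [pvA_loop.eq_def]
    rw [dif_pos ⟨by omega, hs⟩, if_neg (not_not_intro hC)]
    have hbue : b re = true := by
      rcases Nat.lt_or_ge rs re with hc | hc
      · exact pvRunEnd_true b n rs re hc (by omega)
      · have : re = rs := by omega
        rw [this]; exact hbrs
    have hD : (g (keys.getD re 0) = true ∧ re = n - 1) ∨
        (g (keys.getD re 0) = true ∧ g (keys.getD (re+1) 0) = false) := by
      by_cases hn : re + 1 < n
      · right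
        refine ⟨by simpa [hbdef] using hbue, ?_⟩
        have := pvRunEnd_stop b n rs (by rw [← hredef] at *; omega)
        rw [← hredef] at this
        simpa [hbdef] using this
      · left
        exact ⟨by simpa [hbdef] using hbue, by omega⟩
    rw [if_neg (not_not_intro hD)]
    have hstate :
        (match pvToTriple best with
          | (mli, mui, md) =>
            match md with
            | none => (some (if s = 0 ∧ g (keys.getD s 0) = true then s else s + 1), some re,
                some |(if re < n - 1 then keys.getD (re+1) 0 else keys.getD re 0) - keys.getD s 0|)
            | some m =>
              if m < |(if re < n - 1 then keys.getD (re+1) 0 else keys.getD re 0) - keys.getD s 0| then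
                (some (if s = 0 ∧ g (keys.getD s 0) = true then s else s + 1), some re,
                  some |(if re < n - 1 then keys.getD (re+1) 0 else keys.getD re 0) - keys.getD s 0|)
              else (mli, mui, md))
        = pvToTriple (pvB_bestStep keys n best (rs, re)) := by
      cases best with
      | none =>
        simp only [pvToTriple, pvB_bestStep]
        rw [hlo, hX]
      | some bb =>
        obtain ⟨m, s', e'⟩ := bb
        simp only [pvToTriple, pvB_bestStep]
        rw [hlo, hX]
        by_cases hm : m < |(if re < n - 1 then keys.getD (re+1) 0 else keys.getD re 0) - keys.getD s 0|
        · rw [if_pos hm, if_pos hm]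
        · rw [if_neg hm, if_neg hm]
    exact congrArg (fun t => pvA_loop keys g n (re+1) (re+1) t le_rfl) hstate
  | succ k ih =>
    intro ui h2 hk hle best
    conv_lhs => rw [pvA_loop.eq_def]
    rw [dif_pos ⟨by omega, hs⟩, if_neg (not_not_intro hC)]
    have hD : ¬((g (keys.getD ui 0) = true ∧ ui = n - 1) ∨
        (g (keys.getD ui 0) = true ∧ g (keys.getD (ui+1) 0) = false)) := by
      by_cases hbu : b ui = true
      · have hrsui : rs ≤ ui := by
          rcases Nat.lt_or_ge s ui with hc | hc
          · omega
          · have he : ui = s := by omega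
            rcases hC with ⟨h1, _⟩ | ⟨h1, _⟩
            · rw [hrsdef, if_pos h1]; omega
            · exfalso
              rw [he] at hbu
              have : g (keys.getD s 0) = true := by simpa [hbdef] using hbu
              rw [h1] at this; cases this
        have hnext : g (keys.getD (ui+1) 0) = true := pvRunEnd_true b n rs (ui+1) (by omega) (by omega)
        rintro (⟨_, hui⟩ | ⟨_, hf⟩)
        · omega
        · rw [hf] at hnext; cases hnext
      · rintro (⟨hgu, _⟩ | ⟨hgu, _⟩) <;> exact hbu hgu
    rw [if_pos hD]
    exact ih (ui+1) (by omega) (by omega) (by omega) best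

theorem pvScan_cons (b : Nat → Bool) (n s : Nat) (hs : s + 1 < n)
    (hC : (b s = true ∧ s = 0) ∨ (b s = false ∧ b (s+1) = true)) :
    pvScan b n s none [] =
      ((if b s then s else s + 1), pvRunEnd b n (if b s then s else s + 1)) ::
        pvScan b n (pvRunEnd b n (if b s then s else s + 1) + 1) none [] := by
  rcases hC with ⟨hg, _⟩ | ⟨hg, hg1⟩
  · rw [if_pos hg]
    have hge := pvRunEnd_ge b n s
    have hlt := pvRunEnd_lt b n s (by omega)
    conv_lhs => rw [pvScan.eq_def]
    rw [dif_pos (by omega : s < n), if_pos hg]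
    rw [pvScan_run b n s (by omega) (pvRunEnd b n s + 1 - (s+1)) (s+1) [] rfl (by omega) (by omega)]
    rw [pvScan_append b n (n - (pvRunEnd b n s + 1)) (pvRunEnd b n s + 1) rfl none ([] ++ [(s, pvRunEnd b n s)])]
    simp
  · rw [if_neg (by rw [hg]; simp)]
    have hge := pvRunEnd_ge b n (s+1)
    have hlt := pvRunEnd_lt b n (s+1) (by omega)
    conv_lhs => rw [pvScan.eq_def]
    rw [dif_pos (by omega : s < n), if_neg (by rw [hg]; simp)]
    conv_lhs => rw [pvScan.eq_def]
    rw [dif_pos hs, if_pos hg1]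
    rw [pvScan_run b n (s+1) (by omega) (pvRunEnd b n (s+1) + 1 - (s+2)) (s+2) [] rfl (by omega) (by omega)]
    rw [pvScan_append b n (n - (pvRunEnd b n (s+1) + 1)) (pvRunEnd b n (s+1) + 1) rfl none ([] ++ [(s+1, pvRunEnd b n (s+1))])]
    simp

theorem pvMain (keys : List Int) (g : Int → Bool) (n : Nat)
    (hne : n = 1 → g (keys.getD 0 0) = false) :
    ∀ k s, n - s = k → (s = 0 ∨ n ≤ s ∨ g (keys.getD s 0) = false) → ∀ best,
      pvA_loop keys g n s s (pvToTriple best) le_rfl =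
      pvToTriple ((pvScan (fun j => g (keys.getD j 0)) n s none []).foldl (pvB_bestStep keys n) best) := by
  intro k
  induction k using Nat.strong_induction_on with
  | _ k ih =>
    intro s hk hinv best
    by_cases hloop : s < n - 1
    · by_cases hC : (g (keys.getD s 0) = true ∧ s = 0) ∨
          (g (keys.getD s 0) = false ∧ g (keys.getD (s+1) 0) = true)
      · -- a run begins here
        have hrs_n : (if g (keys.getD s 0) = true then s else s + 1) < n := by split <;> omega
        have hsrs : s ≤ (if g (keys.getD s 0) = true then s else s + 1) := by split <;> omega
        have hre_ge := pvRunEnd_ge (fun j => g (keys.getD j 0)) n (if g (keys.getD s 0) = true then s else s + 1)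
        have hre_lt := pvRunEnd_lt (fun j => g (keys.getD j 0)) n (if g (keys.getD s 0) = true then s else s + 1) hrs_n
        rw [pvLoop_run keys g n s hloop hC
          (pvRunEnd (fun j => g (keys.getD j 0)) n (if g (keys.getD s 0) = true then s else s + 1) - s)
          s (by omega) rfl le_rfl best]
        have hinv2 : pvRunEnd (fun j => g (keys.getD j 0)) n (if g (keys.getD s 0) = true then s else s + 1) + 1 = 0 ∨
            n ≤ pvRunEnd (fun j => g (keys.getD j 0)) n (if g (keys.getD s 0) = true then s else s + 1) + 1 ∨
            g (keys.getD (pvRunEnd (fun j => g (keys.getD j 0)) n (if g (keys.getD s 0) = true then s else s + 1) + 1) 0) = false := by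
          by_cases hn2 : pvRunEnd (fun j => g (keys.getD j 0)) n (if g (keys.getD s 0) = true then s else s + 1) + 1 < n
          · right; right
            exact pvRunEnd_stop (fun j => g (keys.getD j 0)) n (if g (keys.getD s 0) = true then s else s + 1) hn2
          · right; left; omega
        rw [ih (n - (pvRunEnd (fun j => g (keys.getD j 0)) n (if g (keys.getD s 0) = true then s else s + 1) + 1))
          (by omega) _ rfl hinv2 (pvB_bestStep keys n best
            ((if g (keys.getD s 0) = true then s else s + 1),
              pvRunEnd (fun j => g (keys.getD j 0)) n (if g (keys.getD s 0) = true then s else s + 1)))]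
        have hCb : ((fun j => g (keys.getD j 0)) s = true ∧ s = 0) ∨
            ((fun j => g (keys.getD j 0)) s = false ∧ (fun j => g (keys.getD j 0)) (s+1) = true) := hC
        rw [pvScan_cons (fun j => g (keys.getD j 0)) n s (by omega) hCb]
        rfl
      · -- no run begins at s: step to s+1
        conv_lhs => rw [pvA_loop.eq_def]
        rw [dif_pos ⟨by omega, hloop⟩, if_pos hC]
        have hbs : g (keys.getD s 0) = false := by
          rcases hinv with h0 | h0 | h0
          · by_cases hb0 : g (keys.getD s 0) = true
            · exact absurd (Or.inl ⟨hb0, h0⟩) hC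
            · exact eq_false_of_ne_true hb0
          · omega
          · exact h0
        have hscan : pvScan (fun j => g (keys.getD j 0)) n s none [] =
            pvScan (fun j => g (keys.getD j 0)) n (s+1) none [] := by
          conv_lhs => rw [pvScan.eq_def]
          rw [dif_pos (by omega : s < n), if_neg (by rw [hbs]; simp)]
        rw [hscan]
        have hinv' : s + 1 = 0 ∨ n ≤ s + 1 ∨ g (keys.getD (s+1) 0) = false := by
          right; right
          by_cases hb1 : g (keys.getD (s+1) 0) = true
          · exact absurd (Or.inr ⟨hbs, hb1⟩) hC
          · exact eq_false_of_ne_true hb1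
        exact ih (n - (s+1)) (by omega) (s+1) rfl hinv' best
    · -- loop exits immediately and there are no runs from s
      conv_lhs => rw [pvA_loop.eq_def]
      rw [dif_neg (by omega : ¬(s < n ∧ s < n - 1))]
      have hscan : pvScan (fun j => g (keys.getD j 0)) n s none [] = [] := by
        by_cases hsn : s < n
        · have hbs : g (keys.getD s 0) = false := by
            rcases hinv with h0 | h0 | h0
            · subst h0; exact hne (by omega)
            · omega
            · exact h0
          conv_lhs => rw [pvScan.eq_def]
          rw [dif_pos hsn, if_neg (by rw [hbs]; simp)]
          conv_lhs => rw [pvScan.eq_def]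
          rw [dif_neg (by omega : ¬(s + 1 < n))]
        · conv_lhs => rw [pvScan.eq_def]
          rw [dif_neg hsn]
      rw [hscan]
      rfl

-- ===== VERDICT (by name: the statement is the Claim_ definition above) =====
theorem find_initial_bounds_spec : Claim_equal_find_initial_bounds := by
  unfold Claim_equal_find_initial_bounds
  intro tests imin imax _hdom
  unfold Spec_find_initial_bounds
  simp only [find_initial_bounds, find_initial_bounds_alt]
  generalize PySem.Dict.ofList tests = d
  generalize PySem.List.sorted d.keys (fun x => x) false = keys
  by_cases hone : keys.length = 1 ∧ d.getD (keys.getD 0 0) false = true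
  · -- the single-True-entry early return of A: B computes the same tuple
    rw [if_pos hone]
    obtain ⟨k0, hk⟩ := List.length_eq_one_iff.mp hone.1
    subst hk
    have hb : d.getD k0 false = true := by simpa using hone.2
    simp [pvB_scanStep, pvB_bestStep, hb, List.range_succ]
  · rw [if_neg hone]
    have hne : keys.length = 1 → d.getD (keys.getD 0 0) false = false := by
      intro h1
      by_cases hb : d.getD (keys.getD 0 0) false = true
      · exact absurd ⟨h1, hb⟩ hone
      · exact eq_false_of_ne_true hb
    rw [show (((none : Option Nat), (none : Option Nat), (none : Option Int))) = pvToTriple none from rfl]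
    rw [pvMain keys (fun k => d.getD k false) keys.length hne keys.length 0 (by omega) (Or.inl rfl) none]
    have hB : (match ((List.range keys.length).foldl (pvB_scanStep (fun k => d.getD k false) keys) ([], none)).2 with
        | none => ((List.range keys.length).foldl (pvB_scanStep (fun k => d.getD k false) keys) ([], none)).1
        | some s => ((List.range keys.length).foldl (pvB_scanStep (fun k => d.getD k false) keys) ([], none)).1 ++ [(s, keys.length - 1)])
        = pvScan (fun j => (fun k => d.getD k false) (keys.getD j 0)) keys.length 0 none [] := by
      rw [List.range_eq_range']
      exact pvFold_scan (fun k => d.getD k false) keys keys.length keys.length 0 (by omega) (by omega) none []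
    rw [hB]
    cases hR : (pvScan (fun j => (fun k => d.getD k false) (keys.getD j 0)) keys.length 0 none []).foldl
        (pvB_bestStep keys keys.length) none with
    | none => rfl
    | some t =>
      obtain ⟨m, sI, eI⟩ := t
      rfl
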